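-- pv_equiv track=rewrite | github.com/fabiommendes/sidekick | sidekick/seq/iter.py | cycle_n
-- ===== SOURCE A (Python) =====
-- def cycle_n(seq, n):
--     data = []
--     store = data.append
--     consumed = False
--
--     while n > 0:
--         if consumed:
--             yield from data
--         else:
--             for x in seq:
--                 store(x)
--                 yield x
--             if data:
--                 consumed = True
--             else:
--                 return
--         n -= 1
-- ===== SOURCE B (Python) =====
-- def cycle_n(seq, n):
--     data = list(seq)
--     for i in range(max(n, 0) * len(data)):
--         yield data[i % len(data)]
-- ===== Notes on version B (the rewrite author's own statement) =====
-- stated objective: alternative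
-- what changed: Replaces A's cached-replay loop with a 'consumed' flag by pure index arithmetic: materialise the sequence once and yield data[i % len(data)] for i in range(max(n,0)*len(data)).
import Mathlib
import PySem

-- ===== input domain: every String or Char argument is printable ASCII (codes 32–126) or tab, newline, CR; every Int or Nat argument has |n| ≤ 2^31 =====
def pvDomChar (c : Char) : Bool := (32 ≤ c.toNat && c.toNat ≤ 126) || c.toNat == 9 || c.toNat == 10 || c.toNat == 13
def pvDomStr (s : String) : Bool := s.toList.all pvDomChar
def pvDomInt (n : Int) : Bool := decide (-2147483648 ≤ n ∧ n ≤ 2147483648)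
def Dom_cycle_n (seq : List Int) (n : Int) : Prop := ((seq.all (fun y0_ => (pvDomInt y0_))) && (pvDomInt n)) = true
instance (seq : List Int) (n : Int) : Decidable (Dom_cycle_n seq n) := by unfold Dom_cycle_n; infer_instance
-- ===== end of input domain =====

-- B replaces A's flagged cached-replay loop by index arithmetic over one range (yield data[i % len]); objective: alternative.


-- ===== PORT A =====
-- the while-loop: state (data, consumed, n); yields are collected into the returned list
def cycle_n_loop (data seq : List Int) (consumed : Bool) (n : Int) : List Int :=
  if n > 0 then
    if consumed then
      data ++ cycle_n_loop data seq true (n - 1)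
    else
      -- for x in seq: store(x); yield x   (data was [] here, so data becomes data ++ seq)
      let data' := data ++ seq
      if data' ≠ [] then
        seq ++ cycle_n_loop data' seq true (n - 1)
      else
        seq  -- return
  else []
termination_by n.toNat
decreasing_by all_goals omega

def cycle_n (seq : List Int) (n : Int) : List Int :=
  cycle_n_loop [] seq false n

-- ===== PORT B =====
-- data = list(seq); for i in range(max(n,0)*len(data)): yield data[i % len(data)]
def cycle_n_alt (seq : List Int) (n : Int) : List Int :=
  let data := seq
  (PySem.List.pyRange 0 (max n 0 * data.length) 1).map
    (fun i => PySem.List.pyGetD data (PySem.Int.mod i data.length) 0)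

-- ===== PRECONDITION & SPEC =====
def Spec_cycle_n (seq : List Int) (n : Int) (out : List Int) : Prop := out = cycle_n_alt seq n
instance (seq : List Int) (n : Int) (out : List Int) : Decidable (Spec_cycle_n seq n out) := by unfold Spec_cycle_n; infer_instance

-- ===== CLAIM (what is proved, stated in full; the proofs are below) =====
def Claim_equal_cycle_n : Prop := ∀ (seq : List Int) (n : Int), Dom_cycle_n seq n → Spec_cycle_n seq n (cycle_n seq n)

-- ===== LEMMAS AND PROOFS =====
-- k copies of s, appended back to front (matches both A's replay depth and B's range blocks)
def repCat (s : List Int) : Nat → List Int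
  | 0 => []
  | k + 1 => s ++ repCat s k

lemma cycle_n_loop_true (data seq : List Int) (n : Int) :
    cycle_n_loop data seq true n = repCat data n.toNat := by
  generalize hk : n.toNat = k
  induction k generalizing n with
  | zero =>
    rw [cycle_n_loop]
    have : ¬ n > 0 := by omega
    simp [this, repCat]
  | succ k ih =>
    rw [cycle_n_loop]
    have hn : n > 0 := by omega
    simp only [if_pos hn, if_true]
    rw [ih (n - 1) (by omega)]
    simp [repCat]

lemma map_mod_range_mul (seq : List Int) (hs : seq ≠ []) (k : Nat) :
    (List.range (k * seq.length)).map
      (fun (j : Nat) => PySem.List.pyGetD seq (PySem.Int.mod ((j : Int)) ((seq.length : Int))) 0)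
    = repCat seq k := by
  have hL : 0 < seq.length := List.length_pos_iff.mpr hs
  induction k with
  | zero => simp [repCat]
  | succ k ih =>
    have hrange : (k + 1) * seq.length = seq.length + k * seq.length := by ring
    rw [hrange, List.range_add, List.map_append, List.map_map]
    have h1 : (List.range seq.length).map
        (fun (j : Nat) => PySem.List.pyGetD seq (PySem.Int.mod ((j : Int)) ((seq.length : Int))) 0) = seq := by
      apply List.ext_getElem
      · simp
      · intro i h1 h2
        simp only [List.getElem_map, List.getElem_range]
        have hi : i < seq.length := by simpa using h1
        rw [PySem.Int.mod_natCast, Nat.mod_eq_of_lt hi,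
            PySem.List.pyGetD_natCast]
        simp [List.getD_eq_getElem?_getD, List.getElem?_eq_getElem hi]
    have h2 : (List.range (k * seq.length)).map
        ((fun (j : Nat) => PySem.List.pyGetD seq (PySem.Int.mod ((j : Int)) ((seq.length : Int))) 0) ∘
          (fun j => seq.length + j))
        = repCat seq k := by
      rw [← ih]
      apply List.map_congr_left
      intro j hj
      simp only [Function.comp]
      congr 1
      rw [PySem.Int.mod_natCast, PySem.Int.mod_natCast, Nat.add_mod_left]
    rw [h1, h2, repCat]

-- ===== VERDICT (by name: the statement is the Claim_ definition above) =====
theorem cycle_n_spec : Claim_equal_cycle_n := by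
  intro seq n _
  show cycle_n seq n = cycle_n_alt seq n
  unfold cycle_n cycle_n_alt
  rw [cycle_n_loop]
  simp only []
  by_cases hn : n > 0
  · have hmax : max n 0 = n := by omega
    rw [PySem.List.pyRange_one]
    simp only [if_pos hn, Bool.false_eq_true, if_false, List.nil_append, hmax, zero_add,
      Int.sub_zero]
    by_cases hs : seq = []
    · simp [hs]
    · have hnt : (n * (seq.length : Int)).toNat = n.toNat * seq.length := by
        have h1 : ((n.toNat : Int)) = n := by omega
        rw [← h1, ← Nat.cast_mul, Int.toNat_natCast]
        simp [hmax]
      simp only [hs, if_true, ne_eq, not_false_iff]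
      rw [cycle_n_loop_true, hnt, List.map_map]
      rw [show ((fun i => PySem.List.pyGetD seq (PySem.Int.mod i (seq.length : Int)) 0) ∘
            (fun k : Nat => (k : Int)))
          = fun (j : Nat) => PySem.List.pyGetD seq (PySem.Int.mod ((j : Int)) ((seq.length : Int))) 0
        from rfl, map_mod_range_mul seq hs n.toNat]
      have hk : n.toNat = (n.toNat - 1) + 1 := by omega
      rw [hk, repCat]
      congr 1
      have : (n - 1).toNat = n.toNat - 1 := by omega
      rw [this]
  · have hmax : max n 0 = 0 := by omega
    simp [hn, hmax]
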